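-- pv_equiv track=rewrite | github.com/NicolasMatton/structure-study-of-trees-and-heap | TasBinomial.py | SupprMin_Tableau
-- ===== SOURCE A (Python) =====
-- def inf(cle1, cle2):
-- #    val32_1 = [(cle1 >> x) & 0xFFFFFF for x in reversed(range(0, 128, 32))]
-- #    val32_2 = [(cle2 >> x) & 0xFFFFFF for x in reversed(range(0, 128, 32))]
-- #    """decomposition en 4 entiers sur 32 bits pour chaque clefs"""
-- #    for i in range(0, 4):
-- #        if val32_1[0] < val32_2[1]:
-- #            return True
-- #        if val32_1[0] > val32_2[1]:
-- #            return False
--     return cle1 < cle2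
--     """cle*cle->boolean
--     prend deux nombre 128 bits et renvoie true si cle1< cle2"""
--
-- def Echanger(x, y): #O(1)
--     tmp = x
--     x = y
--     y = tmp
--     return (x, y)
--     """permute x et y"""
--
-- def SupprMin_Tableau(T): #O(log(n))
--     if(T == []):
--         return T
--
--     T[0] = T[len(T) - 1]    #remplacement de la cle min par la derniere cle ajoutee
--     T.pop(len(T) - 1)       #suppression de la derniere feuille pleine
--     maxi = ((len(T) - 1) - 1)//2    #indice maximum possible
--     i = 0
--     while(i <= maxi):
--         if(2*i + 2 >= len(T)):
--             newI = 2*i + 1    #derniere valeur du tableau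
--         else:
--             if(inf(T[2*i+1],T[2*i+2])):
--                 newI = 2*i+1    #recuperation de l'indice du fils gauche
--             else:
--                 newI = 2*i+2    #recuperation de l'indice du fils droit
--         if(inf(T[newI],T[i])):
--             T[i], T[newI] = Echanger(T[i], T[newI])
--             i = newI
--         else:
--             break   #le tableau est trie, plus besoin d'iterer
--     return T
--     """Tableau->Tableau
--     supprime la valeur minimale du tableau et le renvoie apres entassement"""
-- ===== SOURCE B (Python) =====
-- def _heapify(T, i):
--     """Recursive sift-down at index i (A's tie rule: right child on equal keys)."""
--     child = 2 * i + 1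
--     if child >= len(T):
--         return
--     right = child + 1
--     if right < len(T) and T[right] <= T[child]:
--         child = right
--     if T[child] < T[i]:
--         T[i], T[child] = T[child], T[i]
--         _heapify(T, child)
--
-- def SupprMin_Tableau(T):
--     if T == []:
--         return T
--     T[0] = T[len(T) - 1]
--     T.pop()
--     _heapify(T, 0)
--     return T
-- ===== Notes on version B (the rewrite author's own statement) =====
-- stated objective: alternative
-- what changed: The explicit while-loop sift-down with a precomputed maximal parent index 'maxi' is replaced by a recursive heapify helper that descends the child structure, checking the child bound 2*i+1 < len(T) directly at each step.
import Mathlib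
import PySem

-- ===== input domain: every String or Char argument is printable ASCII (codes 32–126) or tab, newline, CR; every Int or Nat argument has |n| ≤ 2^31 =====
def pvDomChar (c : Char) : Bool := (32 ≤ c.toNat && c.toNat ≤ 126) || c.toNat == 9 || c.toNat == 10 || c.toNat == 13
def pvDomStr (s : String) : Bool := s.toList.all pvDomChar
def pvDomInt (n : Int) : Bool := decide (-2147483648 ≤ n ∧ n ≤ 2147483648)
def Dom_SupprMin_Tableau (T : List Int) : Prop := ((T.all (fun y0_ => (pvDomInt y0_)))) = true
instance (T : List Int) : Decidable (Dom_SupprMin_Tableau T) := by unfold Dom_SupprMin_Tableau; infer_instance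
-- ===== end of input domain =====

-- B replaces A's while-loop sift-down (with precomputed maxi) by a recursive heapify
-- descending the child structure; same return value. Both Pythons mutate T in place
-- identically (same writes); the equivalence proved here is about the returned list.


-- ===== PORT A =====
-- A's newI selection (the if/else chain inside the while body), extracted as a helper
def pvPickChildA (T : List Int) (i : Nat) : Nat :=
  if 2*i + 2 ≥ T.length then 2*i + 1
  else if T.getD (2*i+1) 0 < T.getD (2*i+2) 0 then 2*i + 1 else 2*i + 2

theorem pvPickChildA_gt (T : List Int) (i : Nat) : i < pvPickChildA T i := by
  unfold pvPickChildA; split_ifs <;> omega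

-- A's while loop; i only ever takes nonnegative values (starts at 0, moves to a child)
def SupprMin_Tableau_loop (T : List Int) (maxi : Int) (i : Nat) : List Int :=
  if (i : Int) ≤ maxi then
    let newI := pvPickChildA T i
    if T.getD newI 0 < T.getD i 0 then
      -- T[i], T[newI] = Echanger(T[i], T[newI])  (simultaneous swap of the two cells)
      SupprMin_Tableau_loop ((T.set i (T.getD newI 0)).set newI (T.getD i 0)) maxi newI
    else T
  else T
termination_by (maxi + 1 - (i : Int)).toNat
decreasing_by
  have := pvPickChildA_gt T i
  omega

def SupprMin_Tableau (T : List Int) : List Int :=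
  if T = [] then T
  else
    let T1 := T.set 0 (T.getD (T.length - 1) 0)   -- T[0] = T[len(T)-1]
    let T2 := T1.dropLast                          -- T.pop(len(T)-1)
    let maxi := PySem.Int.floordiv (((T2.length : Int) - 1) - 1) 2
    SupprMin_Tableau_loop T2 maxi 0

-- ===== PORT B =====
-- B's child choice: right child when it exists and T[right] <= T[child]
def pvSmallerChildB (T : List Int) (child : Nat) : Nat :=
  if child + 1 < T.length ∧ T.getD (child+1) 0 ≤ T.getD child 0 then child + 1 else child

theorem pvSmallerChildB_bounds (T : List Int) (c : Nat) (h : c < T.length) :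
    c ≤ pvSmallerChildB T c ∧ pvSmallerChildB T c < T.length := by
  unfold pvSmallerChildB; split_ifs <;> omega

-- B's recursive sift-down
def SupprMin_Tableau_heapify (T : List Int) (i : Nat) : List Int :=
  if h : 2*i + 1 < T.length then
    let c := pvSmallerChildB T (2*i + 1)
    if T.getD c 0 < T.getD i 0 then
      SupprMin_Tableau_heapify ((T.set i (T.getD c 0)).set c (T.getD i 0)) c
    else T
  else T
termination_by T.length - i
decreasing_by
  have := pvSmallerChildB_bounds T (2*i+1) h
  simp only [List.length_set]
  omega

def SupprMin_Tableau_alt (T : List Int) : List Int :=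
  if T = [] then T
  else
    let T2 := (T.set 0 (T.getD (T.length - 1) 0)).dropLast
    SupprMin_Tableau_heapify T2 0

-- ===== PRECONDITION & SPEC =====
def Spec_SupprMin_Tableau (T : List Int) (out : List Int) : Prop := out = SupprMin_Tableau_alt T
instance (T : List Int) (out : List Int) : Decidable (Spec_SupprMin_Tableau T out) := by unfold Spec_SupprMin_Tableau; infer_instance

-- ===== CLAIM (what is proved, stated in full; the proofs are below) =====
def Claim_equal_SupprMin_Tableau : Prop := ∀ (T : List Int), Dom_SupprMin_Tableau T → Spec_SupprMin_Tableau T (SupprMin_Tableau T)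

-- ===== LEMMAS AND PROOFS =====

-- A's loop guard i ≤ maxi (maxi = (len-2)//2) says exactly that the left child exists
theorem pv_guard_iff (n i : Nat) :
    ((i : Int) ≤ PySem.Int.floordiv (((n : Int)) - 1 - 1) 2) ↔ 2*i + 1 < n := by
  rw [PySem.Int.floordiv_eq_ediv_of_pos (by omega)]
  omega

-- with the left child in range, A's and B's child selections agree
theorem pv_pick_eq (T : List Int) (i : Nat) (h : 2*i + 1 < T.length) :
    pvPickChildA T i = pvSmallerChildB T (2*i + 1) := by
  unfold pvPickChildA pvSmallerChildB
  have he : 2*i + 1 + 1 = 2*i + 2 := by omega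
  rw [he]
  split_ifs <;> omega

theorem pv_loop_eq_heapify (k : Nat) :
    ∀ (T : List Int) (i : Nat), T.length - i ≤ k →
      SupprMin_Tableau_loop T (PySem.Int.floordiv (((T.length : Int)) - 1 - 1) 2) i =
        SupprMin_Tableau_heapify T i := by
  induction k with
  | zero =>
      intro T i hk
      rw [SupprMin_Tableau_loop, SupprMin_Tableau_heapify]
      have hg : ¬ ((i : Int) ≤ PySem.Int.floordiv (((T.length : Int)) - 1 - 1) 2) := by
        rw [pv_guard_iff]; omega
      rw [if_neg hg, dif_neg (by omega)]
  | succ k ih =>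
      intro T i hk
      rw [SupprMin_Tableau_loop, SupprMin_Tableau_heapify]
      by_cases hg : 2*i + 1 < T.length
      · rw [if_pos ((pv_guard_iff T.length i).mpr hg), dif_pos hg]
        rw [pv_pick_eq T i hg]
        set c := pvSmallerChildB T (2*i+1) with hc
        by_cases hlt : T.getD c 0 < T.getD i 0
        · rw [if_pos hlt, if_pos hlt]
          have hb := pvSmallerChildB_bounds T (2*i+1) hg
          have hlen : ((T.set i (T.getD c 0)).set c (T.getD i 0)).length = T.length := by
            simp
          rw [← hlen]
          exact ih _ c (by rw [hlen]; omega)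
        · rw [if_neg hlt, if_neg hlt]
      · rw [if_neg (by rw [pv_guard_iff]; omega), dif_neg hg]

-- ===== VERDICT (by name: the statement is the Claim_ definition above) =====
theorem SupprMin_Tableau_spec : Claim_equal_SupprMin_Tableau := by
  intro T _
  unfold Spec_SupprMin_Tableau SupprMin_Tableau SupprMin_Tableau_alt
  by_cases hT : T = []
  · simp [hT]
  · rw [if_neg hT, if_neg hT]
    exact pv_loop_eq_heapify _ _ 0 (le_refl _)
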